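-- pv_equiv track=rewrite | github.com/tcl326/advent-of-code-2020 | day10/adapter_array.py | adapter_chain
-- ===== SOURCE A (Python) =====
-- def _can_link(input_, rating):
--     if rating - input_ > 0 and rating - input_ < 4:
--         return True
--     return False
--
-- def adapter_chain(adapters):
--     end = max(adapters) + 3
--     def dfs(curr, path, left):
--         if not left and _can_link(curr, end):
--             return path + [end]
--         for l in left:
--             if not _can_link(curr, l):
--                 continue
--             p = dfs(l, path + [l], left - {l})
--             if p:
--                 return p
--         return None
--
--     start = 0
--     path = dfs(start, [0], set(adapters))
--     return path
-- ===== SOURCE B (Python) =====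
-- def adapter_chain(adapters):
--     end = max(adapters) + 3
--     chain = [0] + sorted(set(adapters)) + [end]
--     for a, b in zip(chain, chain[1:]):
--         if not 0 < b - a < 4:
--             return None
--     return chain
-- ===== Notes on version B (the rewrite author's own statement) =====
-- stated objective: alternative
-- what changed: Replaces the backtracking DFS over subsets of adapters (exponential in the worst case) with a sort-then-scan: since every step must strictly increase by 1-3 and all adapters must be used, the only possible chain is 0, then the sorted distinct adapters, then max+3, so B sorts once and checks adjacent gaps.
import Mathlib
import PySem

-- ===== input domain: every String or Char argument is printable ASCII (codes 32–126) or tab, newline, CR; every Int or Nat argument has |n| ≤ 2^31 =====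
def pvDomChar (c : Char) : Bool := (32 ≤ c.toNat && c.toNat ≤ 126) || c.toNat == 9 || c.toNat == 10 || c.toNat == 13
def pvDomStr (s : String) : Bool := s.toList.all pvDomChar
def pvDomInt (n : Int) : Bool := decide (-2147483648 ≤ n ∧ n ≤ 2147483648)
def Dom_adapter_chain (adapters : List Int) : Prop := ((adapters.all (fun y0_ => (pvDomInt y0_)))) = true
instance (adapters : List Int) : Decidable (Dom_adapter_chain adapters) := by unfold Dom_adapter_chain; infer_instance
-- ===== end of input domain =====

-- B replaces A's backtracking DFS (exponential worst case) with sort-then-scan: the only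
-- possible chain is 0, then the sorted distinct adapters, then max+3; objective: alternative.

-- ===== PORT A =====
-- _can_link
def canLink (input_ rating : Int) : Bool :=
  if 0 < rating - input_ && rating - input_ < 4 then true else false

-- Python truthiness of the dfs result (None and [] are falsy)
def pTruthy : Option (List Int) → Bool
  | some (_ :: _) => true
  | _ => false

-- the nested dfs: the for-loop body, taking the recursive call as `next`
def dfsLoop (next : Int → Option (List Int)) (curr : Int) : List Int → Option (List Int)
  | [] => none
  | l :: rest =>
    if !canLink curr l then dfsLoop next curr rest
    else
      let p := next l
      if pTruthy p then p else dfsLoop next curr rest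

-- `fuel` is only a termination guard: recursion depth is bounded by left.length and
-- every call is made with fuel ≥ left.length, so the fuel-exhausted branch never runs
def dfsStep (fuel : Nat) (e curr : Int) (path left : List Int) : Option (List Int) :=
  if left.isEmpty && canLink curr e then some (path ++ [e])
  else
    let next : Int → Option (List Int) :=
      match fuel with
      | 0 => fun _ => none
      | f + 1 => fun l => dfsStep f e l (path ++ [l]) (PySem.Set.diff left [l])
    dfsLoop next curr left

def adapter_chain (adapters : List Int) : Option (List Int) :=
  match PySem.List.max? adapters (fun x => x) with
  | none => none     -- Python: max([]) raises ValueError; excluded by Pre_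
  | some mx =>
    let left := PySem.Set.ofList adapters
    dfsStep left.length (mx + 3) 0 [0] left

-- ===== PORT B =====
-- the adjacent-gap scan (zip(chain, chain[1:]))
def gapsOk : List Int → Bool
  | a :: b :: rest => if !(0 < b - a && b - a < 4) then false else gapsOk (b :: rest)
  | _ => true

def adapter_chain_alt (adapters : List Int) : Option (List Int) :=
  match PySem.List.max? adapters (fun x => x) with
  | none => none     -- Python: max([]) raises ValueError; excluded by Pre_
  | some mx =>
    let chain := 0 :: PySem.List.sorted (PySem.Set.ofList adapters) (fun x => x) false ++ [mx + 3]
    if gapsOk chain then some chain else none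

-- ===== PRECONDITION & SPEC =====
-- Pre_ excludes only the empty list, on which A raises ValueError (max of empty sequence).
def Pre_adapter_chain (adapters : List Int) : Prop := adapters ≠ []
instance (adapters : List Int) : Decidable (Pre_adapter_chain adapters) := by
  unfold Pre_adapter_chain; infer_instance

def pvWitness_adapter_chain : List Int := [3, 1, 2]

def Spec_adapter_chain (adapters : List Int) (out : Option (List Int)) : Prop := out = adapter_chain_alt adapters
instance (adapters : List Int) (out : Option (List Int)) : Decidable (Spec_adapter_chain adapters out) := by unfold Spec_adapter_chain; infer_instance

-- ===== CLAIM (what is proved, stated in full; the proofs are below) =====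
def Claim_equal_adapter_chain : Prop := ∀ (adapters : List Int), Dom_adapter_chain adapters → Pre_adapter_chain adapters → Spec_adapter_chain adapters (adapter_chain adapters)

-- ===== LEMMAS AND PROOFS =====

theorem diff_single_eq_erase (left : List Int) (l : Int) (h : left.Nodup) :
    PySem.Set.diff left [l] = left.erase l := by
  rw [h.erase_eq_filter l]
  show left.filter (fun x => !([l].contains x)) = _
  apply List.filter_congr
  intro x _
  show (!([l].contains x)) = (x != l)
  by_cases hx : x = l
  · subst hx; simp
  · simp [hx]

theorem pTruthy_some (L : List Int) : pTruthy (some L) = !L.isEmpty := by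
  cases L <;> rfl

-- head of sorted of a nodup nonempty list is its minimum, and the tail is sorted(erase min)
theorem sorted_head_min (left : List Int) (hnd : left.Nodup) (hne : left ≠ []) :
    ∃ m t, PySem.List.sorted left (fun x => x) false = m :: t ∧ m ∈ left ∧
      (∀ y ∈ left, m ≤ y) ∧ PySem.List.sorted (left.erase m) (fun x => x) false = t := by
  obtain ⟨m, t, hs⟩ : ∃ m t, PySem.List.sorted left (fun x => x) false = m :: t := by
    cases h : PySem.List.sorted left (fun x => x) false with
    | nil => exact absurd ((PySem.List.sorted_eq_nil_iff ..).mp h) hne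
    | cons a b => exact ⟨a, b, rfl⟩
  have hperm : (m :: t).Perm left := hs ▸ PySem.List.sorted_perm left (fun x => x) false
  have hm : m ∈ left := hperm.mem_iff.mp (List.mem_cons_self ..)
  have hmin := PySem.List.key_head_sorted_le left (fun x => x) hs
  refine ⟨m, t, hs, hm, hmin, ?_⟩
  apply PySem.List.sorted_eq_of_perm_of_pairwise_lt
  · exact (hperm.trans (List.perm_cons_erase hm)).cons_inv
  · have hp : (m :: t).Pairwise (fun a b : Int => a ≤ b) :=
      hs ▸ PySem.List.sorted_pairwise left (fun x => x)
    have hnd' : (m :: t).Nodup := hperm.nodup_iff.mpr hnd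
    have hlt : (m :: t).Pairwise (fun a b : Int => a < b) :=
      (hp.and hnd').imp (fun h => lt_of_le_of_ne h.1 h.2)
    exact hlt.of_cons

-- characterization of A's dfs on a duplicate-free `left`
theorem dfs_char (n : Nat) : ∀ (left : List Int), left.length = n → left.Nodup →
    ∀ (fuel : Nat), left.length ≤ fuel → ∀ (e curr : Int) (path : List Int),
    dfsStep fuel e curr path left =
      (if gapsOk (curr :: (PySem.List.sorted left (fun x => x) false ++ [e]))
       then some (path ++ (PySem.List.sorted left (fun x => x) false ++ [e]))
       else none) := by
  induction n using Nat.strong_induction_on with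
  | _ n IH =>
  intro left hlen hnd fuel hfuel e curr path
  by_cases hne : left = []
  · subst hne
    have hs : PySem.List.sorted ([] : List Int) (fun x => x) false = [] := rfl
    cases fuel <;>
      simp only [dfsStep, dfsLoop, hs, List.isEmpty_nil, Bool.true_and, List.nil_append,
        gapsOk, canLink] <;> split <;> simp_all
  · -- left nonempty
    obtain ⟨m, t, hs, hm, hmin, ht⟩ := sorted_head_min left hnd hne
    obtain ⟨f, rfl⟩ : ∃ f, fuel = f + 1 := by
      cases fuel with
      | zero => exact absurd hfuel (by simp [List.length_eq_zero_iff, hne])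
      | succ f => exact ⟨f, rfl⟩
    -- the value of the recursive call made by the loop, for each candidate
    have hnext : ∀ l ∈ left, dfsStep f e l (path ++ [l]) (PySem.Set.diff left [l]) =
        if l = m ∧ gapsOk (m :: (t ++ [e])) = true
        then some (path ++ (m :: (t ++ [e]))) else none := by
      intro l hl
      rw [diff_single_eq_erase left l hnd]
      have hpos : 0 < left.length := List.length_pos_of_ne_nil hne
      have hlt : (left.erase l).length < n := by
        rw [List.length_erase_of_mem hl]; omega
      rw [IH _ hlt (left.erase l) rfl (hnd.erase l) f
        (by rw [List.length_erase_of_mem hl]; omega)]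
      by_cases hlm : l = m
      · subst hlm
        rw [ht]
        by_cases hg : gapsOk (l :: (t ++ [e])) = true <;> simp [hg, List.append_assoc]
      · -- l ≠ m : the minimum m is still in left.erase l, so the first gap is ≤ 0
        have hmel : m ∈ left.erase l := (List.mem_erase_of_ne (fun h => hlm h.symm)).mpr hm
        obtain ⟨m', t', hs', hm', hmin', _⟩ :=
          sorted_head_min (left.erase l) (hnd.erase l) (List.ne_nil_of_mem hmel)
        have hmm : m' = m :=
          le_antisymm (hmin' m hmel) (hmin m' (List.mem_of_mem_erase hm'))
        have hml : m < l :=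
          lt_of_le_of_ne (hmin l hl) (fun h => hlm h.symm)
        rw [hs', hmm]
        have hcond : (decide (0 < m - l) && decide (m - l < 4)) = false := by
          rw [decide_eq_false (by omega : ¬ (0 < m - l))]
          rfl
        have hgf : gapsOk (l :: m :: (t' ++ [e])) = false := by
          simp only [gapsOk]
          rw [hcond]
          rfl
        simp only [List.cons_append]
        rw [hgf]
        simp [hlm]
    -- the for-loop
    have hloop : ∀ cands, (∀ x ∈ cands, x ∈ left) →
        dfsLoop (fun l => dfsStep f e l (path ++ [l]) (PySem.Set.diff left [l])) curr cands =
          if m ∈ cands ∧ canLink curr m = true ∧ gapsOk (m :: (t ++ [e])) = true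
          then some (path ++ (m :: (t ++ [e]))) else none := by
      intro cands
      induction cands with
      | nil => intro _; simp [dfsLoop]
      | cons l rest ihc =>
        intro hsub
        have hrest := ihc (fun x hx => hsub x (List.mem_cons_of_mem l hx))
        have hl : l ∈ left := hsub l (List.mem_cons_self ..)
        simp only [dfsLoop]
        by_cases hcl : canLink curr l = true
        · simp only [hcl, Bool.not_true, Bool.false_eq_true, if_false]
          rw [hnext l hl]
          by_cases hlm : l = m
          · subst hlm
            by_cases hg : gapsOk (l :: (t ++ [e])) = true
            · have hpt : pTruthy (some (path ++ (l :: (t ++ [e])))) = true := by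
                rw [pTruthy_some]; simp
              simp [hg, hpt, hcl]
            · simp only [hg]
              simp only [pTruthy]
              rw [hrest]
              simp [hg]
          · have hne' : ¬ (l = m ∧ gapsOk (m :: (t ++ [e])) = true) := fun h => hlm h.1
            simp only [hne', if_false]
            simp only [pTruthy]
            rw [hrest]
            have hml' : ¬ (m = l) := fun h => hlm h.symm
            simp [List.mem_cons, hml']
        · simp only [Bool.not_eq_true] at hcl
          simp only [hcl, Bool.not_false, if_true]
          rw [hrest]
          by_cases hlm : l = m
          · subst hlm
            simp [hcl]
          · have hml' : ¬ (m = l) := fun h => hlm h.symm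
            simp [List.mem_cons, hml']
    -- assemble
    have hie : left.isEmpty = false := by simp [hne]
    simp only [dfsStep, hie, Bool.false_and, Bool.false_eq_true, if_false]
    rw [hloop left (fun x hx => hx), hs]
    simp only [List.cons_append, gapsOk, canLink]
    by_cases hcl : (0 < m - curr && m - curr < 4) = true
    · simp [hm]
    · simp [hm]

-- ===== VERDICT (by name: the statement is the Claim_ definition above) =====
theorem adapter_chain_spec : Claim_equal_adapter_chain := by
  intro adapters _ _
  unfold Spec_adapter_chain adapter_chain adapter_chain_alt
  cases hmx : PySem.List.max? adapters (fun x => x) with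
  | none => rfl
  | some mx =>
    simp only
    rw [dfs_char (PySem.Set.ofList adapters).length (PySem.Set.ofList adapters) rfl
      (PySem.Set.nodup_ofList adapters) (PySem.Set.ofList adapters).length le_rfl]
    simp [List.cons_append]
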